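-- pv_equiv track=rewrite | github.com/Scienthusiasts/sood-mcl | semi_mmrotate/models/rotated_dt_baseline_ss_orcnn_head.py | extract_scale_order
-- ===== SOURCE A (Python) =====
-- def extract_scale_order(bs):
--     scale_num = 5
--     lvl_range = [0, 16384, 20480, 21504, 21760, 21824]
--     total_anchor_num = 21824
--     lvl_idx = [[] for _ in range(scale_num)]
--     for b in range(bs):
--         for lvl in range(scale_num):
--             lvl_idx[lvl] += list(range(b * total_anchor_num + lvl_range[lvl], b * total_anchor_num + lvl_range[lvl+1]))
--     return lvl_idx
-- ===== SOURCE B (Python) =====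
-- def extract_scale_order(bs):
--     # Single flat pass over all global indices, bucketing each by its level.
--     total_anchor_num = 21824
--     lvl_idx = [[], [], [], [], []]
--     for idx in range(bs * total_anchor_num):
--         pos = idx % total_anchor_num
--         lvl = (pos >= 16384) + (pos >= 20480) + (pos >= 21504) + (pos >= 21760)
--         lvl_idx[lvl].append(idx)
--     return lvl_idx
-- ===== Notes on version B (the rewrite author's own statement) =====
-- stated objective: alternative
-- what changed: Replaces the nested batch-by-level loop that concatenates precomputed ranges with a single flat pass over all global indices 0..bs*21824-1 that buckets each index by comparing its within-batch position against the fixed level thresholds.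
import Mathlib
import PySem

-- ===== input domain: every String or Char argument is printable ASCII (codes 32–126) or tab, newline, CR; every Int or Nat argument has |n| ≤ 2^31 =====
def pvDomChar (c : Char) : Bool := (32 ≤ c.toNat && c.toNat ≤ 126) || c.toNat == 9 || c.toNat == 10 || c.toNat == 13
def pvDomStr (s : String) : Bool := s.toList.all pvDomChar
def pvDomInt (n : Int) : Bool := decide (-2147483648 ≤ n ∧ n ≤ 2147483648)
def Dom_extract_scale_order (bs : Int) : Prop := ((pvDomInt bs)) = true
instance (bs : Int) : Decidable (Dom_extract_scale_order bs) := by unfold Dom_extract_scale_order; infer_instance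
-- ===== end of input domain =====

-- B replaces A's nested batch/level loop of range concatenations by one flat pass over all
-- global indices that buckets each index by comparing its within-batch position against the
-- fixed level thresholds (objective: alternative decomposition, same cost).

-- ===== PORT A =====
def extract_scale_order (bs : Int) : List (List Int) :=
  let scale_num : Int := 5
  let lvl_range : List Int := [0, 16384, 20480, 21504, 21760, 21824]
  let total_anchor_num : Int := 21824
  let lvl_idx : List (List Int) := (PySem.List.pyRange 0 scale_num 1).map (fun _ => ([] : List Int))
  (PySem.List.pyRange 0 bs 1).foldl (fun st b =>
    (PySem.List.pyRange 0 scale_num 1).foldl (fun st lvl =>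
      -- lvl ∈ [0,5), so lvl.toNat and the pyGetD defaults are never hit out of range
      st.modify lvl.toNat (fun l =>
        l ++ PySem.List.pyRange (b * total_anchor_num + PySem.List.pyGetD lvl_range lvl 0)
                                (b * total_anchor_num + PySem.List.pyGetD lvl_range (lvl + 1) 0) 1)) st)
    lvl_idx

-- ===== PORT B =====
def extract_scale_order_alt (bs : Int) : List (List Int) :=
  let total_anchor_num : Int := 21824
  (PySem.List.pyRange 0 (bs * total_anchor_num) 1).foldl (fun st idx =>
    let pos := PySem.Int.mod idx total_anchor_num
    let lvl : Int := (if pos ≥ 16384 then 1 else 0) + (if pos ≥ 20480 then 1 else 0)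
                   + (if pos ≥ 21504 then 1 else 0) + (if pos ≥ 21760 then 1 else 0)
    st.modify lvl.toNat (fun l => l ++ [idx]))
    [[], [], [], [], []]

-- ===== PRECONDITION & SPEC =====
def Spec_extract_scale_order (bs : Int) (out : List (List Int)) : Prop := out = extract_scale_order_alt bs
instance (bs : Int) (out : List (List Int)) : Decidable (Spec_extract_scale_order bs out) := by unfold Spec_extract_scale_order; infer_instance

-- ===== CLAIM (what is proved, stated in full; the proofs are below) =====
def Claim_equal_extract_scale_order : Prop := ∀ (bs : Int), Dom_extract_scale_order bs → Spec_extract_scale_order bs (extract_scale_order bs)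

-- ===== LEMMAS AND PROOFS =====

-- B's loop body as a named step function (definitionally the lambda in the port)
def pvStepB (st : List (List Int)) (idx : Int) : List (List Int) :=
  let pos := PySem.Int.mod idx 21824
  let lvl : Int := (if pos ≥ 16384 then 1 else 0) + (if pos ≥ 20480 then 1 else 0)
                 + (if pos ≥ 21504 then 1 else 0) + (if pos ≥ 21760 then 1 else 0)
  st.modify lvl.toNat (fun l => l ++ [idx])

def pvLvlOf (idx : Int) : Nat :=
  ((if PySem.Int.mod idx 21824 ≥ 16384 then (1:Int) else 0) + (if PySem.Int.mod idx 21824 ≥ 20480 then 1 else 0)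
   + (if PySem.Int.mod idx 21824 ≥ 21504 then 1 else 0) + (if PySem.Int.mod idx 21824 ≥ 21760 then 1 else 0)).toNat

lemma pvStepB_eq (st : List (List Int)) (idx : Int) :
    pvStepB st idx = st.modify (pvLvlOf idx) (fun l => l ++ [idx]) := rfl

-- the effect of one whole batch b, as A produces it
def pvChunk (b lo hi : Int) : List Int := PySem.List.pyRange (b * 21824 + lo) (b * 21824 + hi) 1

def pvBatch (st : List (List Int)) (b : Int) : List (List Int) :=
  (((((st.modify 0 (fun l => l ++ pvChunk b 0 16384)).modify 1 (fun l => l ++ pvChunk b 16384 20480)).modify 2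
      (fun l => l ++ pvChunk b 20480 21504)).modify 3 (fun l => l ++ pvChunk b 21504 21760)).modify 4
      (fun l => l ++ pvChunk b 21760 21824))

lemma pvModify_modify {α : Type} (l : List α) (i : Nat) (f g : α → α) :
    (l.modify i f).modify i g = l.modify i (fun x => g (f x)) := by
  induction l generalizing i with
  | nil => simp
  | cons a t ih =>
    cases i with
    | zero => simp [List.modify_cons]
    | succ j => simpa [List.modify_cons] using ih j

lemma pvModify_id {α : Type} (l : List α) (i : Nat) : l.modify i (fun x => x) = l := by
  induction l generalizing i with
  | nil => simp
  | cons a t ih =>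
    cases i with
    | zero => simp [List.modify_cons]
    | succ j => simpa [List.modify_cons] using ih j

lemma pvConstLevel (xs : List Int) : ∀ (st : List (List Int)) (k : Nat),
    (∀ x ∈ xs, pvLvlOf x = k) → xs.foldl pvStepB st = st.modify k (fun l => l ++ xs) := by
  induction xs with
  | nil =>
    intro st k _
    simpa using (pvModify_id st k).symm
  | cons x t ih =>
    intro st k h
    have hx : pvLvlOf x = k := h x (by simp)
    have ht : ∀ y ∈ t, pvLvlOf y = k := fun y hy => h y (by simp [hy])
    simp only [List.foldl_cons, pvStepB_eq, hx, ih _ k ht, pvModify_modify]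
    simp

lemma pvLvl_in (b x lo hi : Int) (k : Nat)
    (hlo : b * 21824 + lo ≤ x) (hhi : x < b * 21824 + hi)
    (h0 : 0 ≤ lo) (hT : hi ≤ 21824)
    (hk : ∀ p : Int, lo ≤ p → p < hi → ((if p ≥ 16384 then (1:Int) else 0) + (if p ≥ 20480 then 1 else 0)
         + (if p ≥ 21504 then 1 else 0) + (if p ≥ 21760 then 1 else 0)).toNat = k) :
    pvLvlOf x = k := by
  have hmod : PySem.Int.mod x 21824 = x % 21824 := PySem.Int.mod_eq_emod_of_pos (by norm_num)
  have hp : x % 21824 = x - b * 21824 := by omega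
  unfold pvLvlOf
  rw [hmod, hp]
  exact hk _ (by omega) (by omega)

lemma pvBlockB (b : Int) (st : List (List Int)) :
    (PySem.List.pyRange (b * 21824) ((b + 1) * 21824) 1).foldl pvStepB st = pvBatch st b := by
  have m0 : ∀ x ∈ pvChunk b 0 16384, pvLvlOf x = 0 := by
    intro x hx; rw [pvChunk, PySem.List.mem_pyRange_one] at hx
    exact pvLvl_in b x 0 16384 0 hx.1 hx.2 (by norm_num) (by norm_num)
      (fun p h1 h2 => by split_ifs <;> omega)
  have m1 : ∀ x ∈ pvChunk b 16384 20480, pvLvlOf x = 1 := by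
    intro x hx; rw [pvChunk, PySem.List.mem_pyRange_one] at hx
    exact pvLvl_in b x 16384 20480 1 hx.1 hx.2 (by norm_num) (by norm_num)
      (fun p h1 h2 => by split_ifs <;> omega)
  have m2 : ∀ x ∈ pvChunk b 20480 21504, pvLvlOf x = 2 := by
    intro x hx; rw [pvChunk, PySem.List.mem_pyRange_one] at hx
    exact pvLvl_in b x 20480 21504 2 hx.1 hx.2 (by norm_num) (by norm_num)
      (fun p h1 h2 => by split_ifs <;> omega)
  have m3 : ∀ x ∈ pvChunk b 21504 21760, pvLvlOf x = 3 := by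
    intro x hx; rw [pvChunk, PySem.List.mem_pyRange_one] at hx
    exact pvLvl_in b x 21504 21760 3 hx.1 hx.2 (by norm_num) (by norm_num)
      (fun p h1 h2 => by split_ifs <;> omega)
  have m4 : ∀ x ∈ pvChunk b 21760 21824, pvLvlOf x = 4 := by
    intro x hx; rw [pvChunk, PySem.List.mem_pyRange_one] at hx
    exact pvLvl_in b x 21760 21824 4 hx.1 hx.2 (by norm_num) (by norm_num)
      (fun p h1 h2 => by split_ifs <;> omega)
  have h1 : PySem.List.pyRange (b * 21824) ((b + 1) * 21824) 1
      = pvChunk b 0 16384 ++ pvChunk b 16384 20480 ++ pvChunk b 20480 21504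
        ++ pvChunk b 21504 21760 ++ pvChunk b 21760 21824 := by
    unfold pvChunk
    rw [show (b + 1) * 21824 = b * 21824 + 21824 by ring,
        PySem.List.pyRange_one_append (b * 21824) (b * 21824 + 16384) (b * 21824 + 21824) (by omega) (by omega),
        PySem.List.pyRange_one_append (b * 21824 + 16384) (b * 21824 + 20480) (b * 21824 + 21824) (by omega) (by omega),
        PySem.List.pyRange_one_append (b * 21824 + 20480) (b * 21824 + 21504) (b * 21824 + 21824) (by omega) (by omega),
        PySem.List.pyRange_one_append (b * 21824 + 21504) (b * 21824 + 21760) (b * 21824 + 21824) (by omega) (by omega),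
        show b * 21824 + 0 = b * 21824 by ring]
    ac_rfl
  rw [h1]
  simp only [List.foldl_append]
  rw [pvConstLevel (pvChunk b 0 16384) st 0 m0,
      pvConstLevel (pvChunk b 16384 20480) _ 1 m1,
      pvConstLevel (pvChunk b 20480 21504) _ 2 m2,
      pvConstLevel (pvChunk b 21504 21760) _ 3 m3,
      pvConstLevel (pvChunk b 21760 21824) _ 4 m4]
  rfl

-- A's whole computation is the fold of pvBatch over the batches
lemma pvA_eq (bs : Int) :
    extract_scale_order bs = (PySem.List.pyRange 0 bs 1).foldl pvBatch [[], [], [], [], []] := by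
  have h5 : PySem.List.pyRange 0 5 1 = [0, 1, 2, 3, 4] := by decide
  have hinit : (PySem.List.pyRange 0 5 1).map (fun _ => ([] : List Int)) = [[], [], [], [], []] := by decide
  have hstep : (fun (st : List (List Int)) (b : Int) =>
      (PySem.List.pyRange 0 5 1).foldl (fun st lvl =>
        st.modify lvl.toNat (fun l =>
          l ++ PySem.List.pyRange (b * 21824 + PySem.List.pyGetD [0, 16384, 20480, 21504, 21760, 21824] lvl 0)
                                  (b * 21824 + PySem.List.pyGetD [0, 16384, 20480, 21504, 21760, 21824] (lvl + 1) 0) 1)) st)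
      = pvBatch := by
    funext st b
    rw [h5]
    simp only [List.foldl_cons, List.foldl_nil]
    norm_num [PySem.List.pyGetD, PySem.List.pyGet?, PySem.List.pyIdx?, pvBatch, pvChunk]
    rfl
  show (PySem.List.pyRange 0 bs 1).foldl (fun (st : List (List Int)) (b : Int) =>
      (PySem.List.pyRange 0 5 1).foldl (fun st lvl =>
        st.modify lvl.toNat (fun l =>
          l ++ PySem.List.pyRange (b * 21824 + PySem.List.pyGetD [0, 16384, 20480, 21504, 21760, 21824] lvl 0)
                                  (b * 21824 + PySem.List.pyGetD [0, 16384, 20480, 21504, 21760, 21824] (lvl + 1) 0) 1)) st)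
      ((PySem.List.pyRange 0 5 1).map (fun _ => ([] : List Int))) = _
  rw [hstep, hinit]

lemma pvB_eq (bs : Int) :
    extract_scale_order_alt bs = (PySem.List.pyRange 0 (bs * 21824) 1).foldl pvStepB [[], [], [], [], []] := rfl

lemma pvMain (n : Nat) : ∀ (st : List (List Int)),
    (PySem.List.pyRange 0 ((n : Int) * 21824) 1).foldl pvStepB st
      = (PySem.List.pyRange 0 (n : Int) 1).foldl pvBatch st := by
  induction n with
  | zero =>
    intro st
    rw [PySem.List.pyRange_one_eq_nil (by norm_num), PySem.List.pyRange_one_eq_nil (by norm_num)]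
    rfl
  | succ m ih =>
    intro st
    have hc : ((m + 1 : Nat) : Int) = (m : Int) + 1 := by push_cast; ring
    rw [hc,
        PySem.List.pyRange_one_append 0 ((m : Int) * 21824) (((m : Int) + 1) * 21824)
          (by positivity) (by nlinarith [Int.natCast_nonneg m]),
        PySem.List.pyRange_one_succ_right (by positivity),
        List.foldl_append, List.foldl_append, ih, List.foldl_cons, List.foldl_nil,
        pvBlockB (m : Int)]

-- ===== VERDICT (by name: the statement is the Claim_ definition above) =====
theorem extract_scale_order_spec : Claim_equal_extract_scale_order := by
  intro bs _
  unfold Spec_extract_scale_order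
  rw [pvA_eq, pvB_eq]
  by_cases h : bs ≤ 0
  · rw [PySem.List.pyRange_one_eq_nil h, PySem.List.pyRange_one_eq_nil (by nlinarith)]
    rfl
  · push Not at h
    have hbs : bs = (bs.toNat : Int) := by omega
    rw [hbs]
    exact (pvMain bs.toNat _).symm
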